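-- pv_equiv track=rewrite | github.com/Kappeki/ByteBoardGame | src/utils/utils.py | final_stack
-- ===== SOURCE A (Python) =====
-- def final_stack(board_dict):
--     stack_count = 0
--     for stack in board_dict.values():
--         if stack:  # Check if there is a stack on this tile
--             stack_count += 1
--             if stack_count > 1 or len(stack) != 8:
--                 # If there is more than one stack, or this stack is not 8 tokens high
--                 return False
--     # If we only found one stack and it was 8 tokens high
--     return stack_count == 1
-- ===== SOURCE B (Python) =====
-- def final_stack(board_dict):
--     # Arithmetic characterization: the position is final iff the board holds
--     # 8 tokens in total and some single stack holds all 8 of them.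
--     lengths = [len(s) for s in board_dict.values()]
--     return sum(lengths) == 8 and 8 in lengths
-- ===== Notes on version B (the rewrite author's own statement) =====
-- stated objective: alternative
-- what changed: Replaces A's early-exit pass that counts non-empty stacks and tests the height inside the loop by an arithmetic aggregate: compute all stack lengths once, then use sum(lengths) == 8 and 8 in lengths, which is equivalent because a total of 8 tokens with one stack holding 8 forces every other stack to be empty.
import Mathlib
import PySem

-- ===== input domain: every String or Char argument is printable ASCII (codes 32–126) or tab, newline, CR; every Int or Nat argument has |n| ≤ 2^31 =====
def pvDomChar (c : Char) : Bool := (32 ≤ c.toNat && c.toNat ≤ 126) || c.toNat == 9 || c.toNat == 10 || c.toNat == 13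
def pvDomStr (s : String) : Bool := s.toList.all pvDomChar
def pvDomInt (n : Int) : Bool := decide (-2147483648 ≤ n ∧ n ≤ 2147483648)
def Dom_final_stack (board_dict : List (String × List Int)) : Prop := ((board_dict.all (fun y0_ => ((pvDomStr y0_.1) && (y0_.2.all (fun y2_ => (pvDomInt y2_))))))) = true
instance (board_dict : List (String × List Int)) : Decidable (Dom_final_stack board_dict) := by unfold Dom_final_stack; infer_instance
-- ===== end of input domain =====

-- B replaces A's early-exit counting loop by an arithmetic aggregate over the stack lengths (alternative, same cost).

-- ===== PORT A =====
-- the for-loop of A: early-exit counting pass over the dict values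
def finalStackLoop (vs : List (List Int)) (stack_count : Int) : Bool :=
  match vs with
  | [] => stack_count == 1
  | stack :: rest =>
    if stack ≠ [] then
      if stack_count + 1 > 1 ∨ stack.length ≠ 8 then false
      else finalStackLoop rest (stack_count + 1)
    else finalStackLoop rest stack_count

def final_stack (board_dict : List (String × List Int)) : Bool :=
  finalStackLoop (PySem.Dict.values (PySem.Dict.ofList board_dict)) 0

-- ===== PORT B =====
def final_stack_alt (board_dict : List (String × List Int)) : Bool :=
  let lengths := (PySem.Dict.values (PySem.Dict.ofList board_dict)).map (fun s => (s.length : Int))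
  lengths.sum == 8 && lengths.contains 8

-- ===== PRECONDITION & SPEC =====
def Spec_final_stack (board_dict : List (String × List Int)) (out : Bool) : Prop := out = final_stack_alt board_dict
instance (board_dict : List (String × List Int)) (out : Bool) : Decidable (Spec_final_stack board_dict out) := by unfold Spec_final_stack; infer_instance

-- ===== CLAIM (what is proved, stated in full; the proofs are below) =====
def Claim_equal_final_stack : Prop := ∀ (board_dict : List (String × List Int)), Dom_final_stack board_dict → Spec_final_stack board_dict (final_stack board_dict)

-- ===== LEMMAS AND PROOFS =====

-- once one stack has been counted, the loop returns true iff no further token exists on the board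
theorem finalStackLoop_one (vs : List (List Int)) :
    finalStackLoop vs 1 = ((vs.map (fun s => (s.length : Int))).sum == 0) := by
  induction vs with
  | nil => rfl
  | cons s rest ih =>
    by_cases hs : s = []
    · simpa [finalStackLoop, hs] using ih
    · have h1 : 1 ≤ s.length := List.length_pos_iff.mpr hs
      have hnn : 0 ≤ (rest.map (fun s => (s.length : Int))).sum :=
        List.sum_nonneg (by intro x hx; simp at hx; obtain ⟨t, _, ht⟩ := hx; omega)
      simp [finalStackLoop, hs]
      omega

theorem finalStackLoop_zero (vs : List (List Int)) :
    finalStackLoop vs 0 =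
      ((vs.map (fun s => (s.length : Int))).sum == 8
        && (vs.map (fun s => (s.length : Int))).contains 8) := by
  induction vs with
  | nil => rfl
  | cons s rest ih =>
    by_cases hs : s = []
    · simpa [finalStackLoop, hs] using ih
    · by_cases h8 : s.length = 8
      · have := finalStackLoop_one rest
        simp [finalStackLoop, hs, h8, this]
      · -- first nonempty stack has wrong height: loop returns false; show RHS is false too
        have h1 : 1 ≤ s.length := List.length_pos_iff.mpr hs
        simp [finalStackLoop, hs, h8]
        intro hsum
        constructor
        · omega
        · intro t htmem ht
          have ht8 : (t.length : Int) = 8 := by exact_mod_cast ht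
          have hmem : (8:Int) ∈ rest.map (fun s => (s.length : Int)) := by
            rw [← ht8]; exact List.mem_map_of_mem htmem
          have hge : (8:Int) ≤ (rest.map (fun s => (s.length : Int))).sum :=
            List.single_le_sum
              (by intro x hx; simp at hx; obtain ⟨u, _, hu⟩ := hx; omega) _ hmem
          omega

-- ===== VERDICT (by name: the statement is the Claim_ definition above) =====
theorem final_stack_spec : Claim_equal_final_stack := by
  intro bd _
  unfold Spec_final_stack final_stack final_stack_alt
  exact finalStackLoop_zero _
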